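-- pv_equiv track=rewrite | github.com/yannickbijl/BioStringCompress | BioStringCompress/lib_compress.py | binCompress
-- ===== SOURCE A (Python) =====
-- def _baseToIntDict() -> dict:
--     allBases = ["A", "C", "G", "T", "R", "Y", "S", "W", "K", "M", "B", "D",
--                 "H", "V", "N", "-"]
--     d = dict([(y,x) for x,y in enumerate(sorted(set(allBases)))])
--     # d = {'-': 0, 'A': 1, 'B': 2, 'C': 3, 'D': 4, 'G': 5, 'H': 6, 'K': 7, 'M': 8, 'N': 9, 'R': 10, 'S': 11, 'T': 12, 'V': 13, 'W': 14, 'Y': 15}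
--     return d
--
-- def _baseToInt(character:str, dictBases:dict) -> int:
--     return dictBases[character]
--
-- def _intToBitConversion(intConvBase: int) -> str:
--     return '{:04b}'.format(intConvBase)
--
-- def _byteToIntConversion(bits:str) -> int:
--     result = 0
--     for bit in bits:
--         result = (result << 1) | int(bit)
--     return result
--
-- def _mergeBitListToByteList(bitList) -> list:
--     bitList = iter(bitList)
--     return [bits+next(bitList, '') for bits in bitList]
--
-- def binCompress(sequence:list = ['A', 'T', 'C', 'G']) -> list:
--     bitList = []
--     dictBases = _baseToIntDict()
--     for character in sequence:
--         intBase = _baseToInt(character, dictBases)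
--         bitList.append(_intToBitConversion(intBase))
--     if (len(bitList) % 2) > 0: # Add padding if necessary with a gap.
--         bitList.append(_intToBitConversion(0))
--     # Each 2 items in bitList forms a byte.
--     byteList = _mergeBitListToByteList(bitList)
--     byteList = [_byteToIntConversion(byte) for byte in byteList]
--     return byteList
-- ===== SOURCE B (Python) =====
-- _CODES = {'-': 0, 'A': 1, 'B': 2, 'C': 3, 'D': 4, 'G': 5, 'H': 6, 'K': 7,
--           'M': 8, 'N': 9, 'R': 10, 'S': 11, 'T': 12, 'V': 13, 'W': 14, 'Y': 15}
--
-- def binCompress(sequence: list = ['A', 'T', 'C', 'G']) -> list: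
--     byteList = []
--     for i in range(0, len(sequence), 2):
--         hi = _CODES[sequence[i]]
--         lo = _CODES[sequence[i + 1]] if i + 1 < len(sequence) else 0
--         byteList.append(hi * 16 + lo)
--     return byteList
-- ===== Notes on version B (the rewrite author's own statement) =====
-- stated objective: simpler
-- what changed: B hardcodes the base-to-code table and packs each pair of bases directly by nibble arithmetic (hi*16+lo, padding a lone trailing base with 0) in one pass over index pairs, instead of formatting each code as a 4-bit string, padding the string list, merging adjacent strings via an iterator trick and re-parsing every byte bit by bit.
import Mathlib
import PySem

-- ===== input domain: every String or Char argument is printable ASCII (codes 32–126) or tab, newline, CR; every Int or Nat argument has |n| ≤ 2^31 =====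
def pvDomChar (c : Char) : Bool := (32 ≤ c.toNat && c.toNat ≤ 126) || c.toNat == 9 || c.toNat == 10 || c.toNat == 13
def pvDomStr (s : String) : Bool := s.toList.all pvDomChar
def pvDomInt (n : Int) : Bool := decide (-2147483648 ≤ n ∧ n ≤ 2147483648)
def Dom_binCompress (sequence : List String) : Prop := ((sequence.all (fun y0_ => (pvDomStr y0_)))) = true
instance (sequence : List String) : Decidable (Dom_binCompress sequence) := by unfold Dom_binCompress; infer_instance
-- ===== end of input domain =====

-- B hardcodes the base→code table and packs each pair by nibble arithmetic (hi*16+lo) in one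
-- two-at-a-time pass, instead of A's 4-bit string formatting, list padding, iterator pairing
-- and bit-by-bit re-parsing. Same values on every sequence of valid base symbols (Pre_).

-- ===== PORT A =====
def pvAllBases : List String :=
  ["A", "C", "G", "T", "R", "Y", "S", "W", "K", "M", "B", "D", "H", "V", "N", "-"]

-- d = dict([(y,x) for x,y in enumerate(sorted(set(allBases)))]); sorted() compares the
-- strings by code points, ported on the List Char side (key x.toList): identical order, kernel-reducible
def pvDictA : PySem.Dict String Int :=
  PySem.Dict.ofList
    ((PySem.List.enumerate
        (PySem.List.sorted (PySem.Set.ofList pvAllBases) (fun x => x.toList) false) 0).map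
      (fun p => (p.2, p.1)))

-- binary digits of m, most significant first (the digit part of '{:04b}'.format)
-- fuel m+1 always suffices (m halves each step); fuel only makes the recursion structural
def pvBinGoFuel : Nat → Nat → List Char
  | 0, _ => []
  | fuel + 1, m =>
    if m < 2 then [Char.ofNat (48 + m)]
    else pvBinGoFuel fuel (m / 2) ++ [Char.ofNat (48 + m % 2)]

def pvBinGo (m : Nat) : List Char := pvBinGoFuel (m + 1) m

-- '{:04b}'.format(n) for n ≥ 0 (A only formats the dict's values 0..15)
def pvIntToBit (n : Int) : List Char :=
  let s := pvBinGo n.toNat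
  List.replicate (4 - s.length) '0' ++ s

-- result = (result << 1) | int(bit); bits here are always '0'/'1', int(c) = c.toNat - 48
def pvByteToInt (bits : List Char) : Int :=
  bits.foldl (fun result bit => PySem.Int.bor (result <<< (1 : Nat)) ((bit.toNat : Int) - 48)) 0

-- _mergeBitListToByteList: pair up adjacent items; a lone last item gets '' appended
def pvMergePairs : List (List Char) → List (List Char)
  | a :: b :: rest => (a ++ b) :: pvMergePairs rest
  | [a] => [a ++ []]
  | [] => []

-- dictBases[character] raises KeyError for a symbol outside the table: excluded by Pre_; getD 0 there
def binCompress (sequence : List String) : List Int :=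
  let bitList := sequence.foldl
    (fun acc character => acc ++ [pvIntToBit (PySem.Dict.getD pvDictA character 0)]) []
  let bitList := if bitList.length % 2 > 0 then bitList ++ [pvIntToBit 0] else bitList
  (pvMergePairs bitList).map pvByteToInt

-- ===== PORT B =====
def pvDictB : PySem.Dict String Int :=
  PySem.Dict.ofList
    [("-", 0), ("A", 1), ("B", 2), ("C", 3), ("D", 4), ("G", 5), ("H", 6), ("K", 7),
     ("M", 8), ("N", 9), ("R", 10), ("S", 11), ("T", 12), ("V", 13), ("W", 14), ("Y", 15)]

-- _CODES[s] raises KeyError outside the table: excluded by Pre_; getD 0 there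
def pvCodeB (s : String) : Int := PySem.Dict.getD pvDictB s 0

-- the for-loop over i = 0, 2, 4, … : one output byte per index pair
def pvPackB : List String → List Int
  | a :: b :: rest => (pvCodeB a * 16 + pvCodeB b) :: pvPackB rest
  | [a] => [pvCodeB a * 16 + 0]
  | [] => []

def binCompress_alt (sequence : List String) : List Int := pvPackB sequence

-- ===== PRECONDITION & SPEC =====
-- Pre_ excludes sequences containing a symbol outside the 16-base alphabet, on which A raises KeyError.
def Pre_binCompress (sequence : List String) : Prop := ∀ s ∈ sequence, s ∈ pvAllBases
instance (sequence : List String) : Decidable (Pre_binCompress sequence) := by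
  unfold Pre_binCompress; infer_instance

def pvWitness_binCompress : List String := ["A", "T", "C", "G", "N"]

def Spec_binCompress (sequence : List String) (out : List Int) : Prop := out = binCompress_alt sequence
instance (sequence : List String) (out : List Int) : Decidable (Spec_binCompress sequence out) := by
  unfold Spec_binCompress; infer_instance

-- ===== CLAIM (what is proved, stated in full; the proofs are below) =====
def Claim_equal_binCompress : Prop :=
  ∀ (sequence : List String), Dom_binCompress sequence → Pre_binCompress sequence →
    Spec_binCompress sequence (binCompress sequence)

-- ===== LEMMAS AND PROOFS =====
-- abbreviation for A's per-base bit string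
def pvF (s : String) : List Char := pvIntToBit (PySem.Dict.getD pvDictA s 0)

theorem pvPair_eq : ∀ a ∈ pvAllBases, ∀ b ∈ pvAllBases,
    pvByteToInt (pvF a ++ pvF b) = pvCodeB a * 16 + pvCodeB b := by decide

theorem pvLone_eq : ∀ a ∈ pvAllBases,
    pvByteToInt (pvF a ++ pvIntToBit 0) = pvCodeB a * 16 + 0 := by decide

theorem pvMain : ∀ (seq : List String), (∀ s ∈ seq, s ∈ pvAllBases) →
    (pvMergePairs
      (if (seq.map pvF).length % 2 > 0 then seq.map pvF ++ [pvIntToBit 0] else seq.map pvF)).map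
      pvByteToInt = pvPackB seq := by
  intro seq
  induction seq using pvPackB.induct with
  | case1 a b rest ih =>
    intro h
    have ha := h a (by simp)
    have hb := h b (by simp)
    have hr : ∀ s ∈ rest, s ∈ pvAllBases := fun s hs => h s (by simp [hs])
    have hih := ih hr
    by_cases hc : (List.map pvF rest).length % 2 > 0
    · have h1 : (List.map pvF (a :: b :: rest)).length % 2 > 0 := by
        simp only [List.map_cons, List.length_cons]; omega
      rw [List.map_cons, List.map_cons] at h1 ⊢
      rw [if_pos h1, List.cons_append, List.cons_append]
      show (pvByteToInt (pvF a ++ pvF b)) ::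
          (pvMergePairs (List.map pvF rest ++ [pvIntToBit 0])).map pvByteToInt = pvPackB (a :: b :: rest)
      rw [if_pos hc] at hih
      rw [pvPair_eq a ha b hb, hih]
      rfl
    · have h1 : ¬ (List.map pvF (a :: b :: rest)).length % 2 > 0 := by
        simp only [List.map_cons, List.length_cons]; omega
      rw [List.map_cons, List.map_cons] at h1 ⊢
      rw [if_neg h1]
      show (pvByteToInt (pvF a ++ pvF b)) ::
          (pvMergePairs (List.map pvF rest)).map pvByteToInt = pvPackB (a :: b :: rest)
      rw [if_neg hc] at hih
      rw [pvPair_eq a ha b hb, hih]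
      rfl
  | case2 a =>
    intro h
    have ha := h a (by simp)
    have h1 : (List.map pvF [a]).length % 2 > 0 := by simp
    rw [if_pos h1]
    show [pvByteToInt (pvF a ++ pvIntToBit 0)] = pvPackB [a]
    rw [pvLone_eq a ha]
    rfl
  | case3 =>
    intro _
    simp [pvMergePairs, pvPackB]

-- ===== VERDICT (by name: the statement is the Claim_ definition above) =====
theorem binCompress_spec : Claim_equal_binCompress := by
  intro sequence _ hpre
  unfold Spec_binCompress binCompress binCompress_alt
  rw [PySem.List.foldl_append_singleton_eq_map]
  simpa using pvMain sequence hpre
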